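-- pv_equiv track=rewrite | github.com/Guillen00/2048 | 2048/logic.py | revisar_matriz
-- ===== SOURCE A (Python) =====
-- def revisar_matriz(mat,i,j):
--
--     if(j==3):
--         if(mat[i][j]==0):
--             return True
--         else:
--             j=0
--             return revisar_matriz(mat,i+1,j)
--     if(i==3 and j==3):
--         if(mat[i][j]==0):
--             return True
--         else:
--             return False
--     if(i<4 and j<4):
--         if(mat[i][j]==0):
--             return True
--         else:
--             return revisar_matriz(mat,i,j+1)
-- ===== SOURCE B (Python) =====
-- def revisar_matriz(mat, i, j):
--     # Iterative row-major scan of the 4x4 board starting at (i, j).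
--     while i < 4 and j < 4:
--         if mat[i][j] == 0:
--             return True
--         if j == 3:
--             i, j = i + 1, 0
--         else:
--             j += 1
-- ===== Notes on version B (the rewrite author's own statement) =====
-- stated objective: simpler
-- what changed: Replaced A's three-way recursive branch cascade (with a dead i==3-and-j==3 branch and duplicated cell tests) by a plain iterative while-loop bounded by i<4 and j<4, with one cell test and one advance step; Pre_ excludes exactly the starts on which A raises: IndexError when the scan reaches a missing cell before any zero, and (conservatively, via a -150 bound on in-board starts) RecursionError for starts far below the board — in the band down to about -240 a matrix of 150+ rows could still let A return, but such an input cannot be cited within the cite size limit.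
-- intended difference: When the start has j==3 and i>=4 and mat[i][3]==0, A skips the bounds check and returns True for a cell outside the 4x4 board, while B returns None; None is the intended value since no board cell from such a start is scanned. — e.g. on revisar_matriz([[9, 9, 9, 9], [9, 9, 9, 9], [9, 9, 9, 9], [9, 9, 9, 9], [9, 9, 9, 0]], 4, 3): A returns some true, B returns none
import Mathlib
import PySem

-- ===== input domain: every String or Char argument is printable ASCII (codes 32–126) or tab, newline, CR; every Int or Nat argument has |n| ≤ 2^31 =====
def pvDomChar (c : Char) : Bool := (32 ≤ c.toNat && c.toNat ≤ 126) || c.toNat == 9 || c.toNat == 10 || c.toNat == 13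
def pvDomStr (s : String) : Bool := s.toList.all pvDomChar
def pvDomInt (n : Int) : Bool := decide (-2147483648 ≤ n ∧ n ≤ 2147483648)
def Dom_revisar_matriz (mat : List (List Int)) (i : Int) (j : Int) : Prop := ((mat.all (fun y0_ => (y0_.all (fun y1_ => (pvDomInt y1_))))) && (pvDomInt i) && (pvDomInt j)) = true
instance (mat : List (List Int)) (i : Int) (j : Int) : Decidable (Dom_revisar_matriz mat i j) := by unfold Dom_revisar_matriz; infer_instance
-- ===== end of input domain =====

-- B replaces A's recursive branch cascade by a plain while-loop bounded by i<4 ∧ j<4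
-- (objective: simpler); on the declared D_ corner (start j=3, i≥4 over a zero cell
-- outside the board) B intentionally returns none where A returns true.
-- Both ports carry a fuel counter solely as a totality guard; inside Pre_ the scan
-- makes at most ~800 steps, so fuel 2000 never runs out there.

-- ===== PORT A =====
def revisarA (mat : List (List Int)) (i : Int) (j : Int) : Nat → Option Bool
  | 0 => none                   -- fuel exhausted: unreachable inside Pre_
  | fuel + 1 =>
    if j = 3 then
      match PySem.List.pyGet? mat i >>= fun row => PySem.List.pyGet? row j with
      | none => none            -- Python raises IndexError here; excluded by Pre_
      | some v =>
        if v = 0 then some true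
        else revisarA mat (i + 1) 0 fuel
    else if i = 3 ∧ j = 3 then  -- dead branch of A, kept literally
      match PySem.List.pyGet? mat i >>= fun row => PySem.List.pyGet? row j with
      | none => none
      | some v => if v = 0 then some true else some false
    else if i < 4 ∧ j < 4 then
      match PySem.List.pyGet? mat i >>= fun row => PySem.List.pyGet? row j with
      | none => none            -- Python raises IndexError here; excluded by Pre_
      | some v =>
        if v = 0 then some true
        else revisarA mat i (j + 1) fuel
    else none                   -- Python's implicit `return None`

def revisar_matriz (mat : List (List Int)) (i : Int) (j : Int) : Option Bool :=
  revisarA mat i j 2000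

-- ===== PORT B =====
def revisarB (mat : List (List Int)) (i : Int) (j : Int) : Nat → Option Bool
  | 0 => none                   -- fuel exhausted: unreachable inside Pre_
  | fuel + 1 =>
    if i < 4 ∧ j < 4 then
      match PySem.List.pyGet? mat i >>= fun row => PySem.List.pyGet? row j with
      | none => none            -- Python raises IndexError here; excluded by Pre_
      | some v =>
        if v = 0 then some true
        else if j = 3 then revisarB mat (i + 1) 0 fuel
        else revisarB mat i (j + 1) fuel
    else none                   -- loop exit: Python's implicit `return None`

def revisar_matriz_alt (mat : List (List Int)) (i : Int) (j : Int) : Option Bool :=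
  revisarB mat i j 2000

-- ===== PRECONDITION & SPEC =====
-- cell at python indices (r, c); some iff the access succeeds in Python
def pvCell (mat : List (List Int)) (p : Int × Int) : Option Int :=
  PySem.List.pyGet? mat p.1 >>= fun row => PySem.List.pyGet? row p.2

-- the cells A visits in order: the quirk start (j=3, i≥4) visits one cell;
-- a start inside the rows i≤3, j≤3 visits row i from column j, then rows i+1..3.
-- (the list is cut to [] outside the -150 bounds only to keep it finite to
-- compute; Pre_'s first conjunct already fails there)
def pvPosList (i : Int) (j : Int) : List (Int × Int) :=
  if 4 ≤ i then (if j = 3 then [(i, 3)] else [])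
  else if j ≤ 3 then
    if -150 ≤ i ∧ -150 ≤ j then
      ((PySem.List.pyRange j 4 1).map fun c => (i, c)) ++
      ((PySem.List.pyRange (i + 1) 4 1).flatMap fun r =>
        (PySem.List.pyRange 0 4 1).map fun c => (r, c))
    else []
  else []

-- the scan returns a value: every visited cell exists up to (and including) the
-- first zero, or all visited cells exist and are nonzero
def pvScanOk (mat : List (List Int)) : List (Int × Int) → Bool
  | [] => true
  | p :: rest =>
    match pvCell mat p with
    | none => false
    | some v => if v = 0 then true else pvScanOk mat rest

-- Pre_ excludes exactly the inputs on which A raises: an IndexError when the scan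
-- reaches a missing cell before any zero, and — conservatively, via the -150 bound —
-- a RecursionError when the start lies far below the board (in the band down to
-- about -240 a matrix of 150+ rows can still let A return; such inputs are excluded
-- conservatively because CPython's exact recursion capacity is not a property of the
-- input).
def Pre_revisar_matriz (mat : List (List Int)) (i : Int) (j : Int) : Prop :=
  ((i ≤ 3 ∧ j ≤ 3) → (-150 ≤ i ∧ -150 ≤ j)) ∧ pvScanOk mat (pvPosList i j) = true
instance (mat : List (List Int)) (i : Int) (j : Int) : Decidable (Pre_revisar_matriz mat i j) := by
  unfold Pre_revisar_matriz; infer_instance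

def pvWitness_revisar_matriz : List (List Int) × Int × Int :=
  ([[2, 4, 2, 4], [4, 2, 4, 2], [2, 4, 2, 4], [4, 2, 0, 2]], 0, 0)

-- When the start has j=3 and i≥4 and mat[i][3] is a zero, A skips the bounds check
-- and returns True for a cell outside the 4x4 board, while B returns None; None is
-- the intended value since no board cell from such a start is scanned.
def D_revisar_matriz (mat : List (List Int)) (i : Int) (j : Int) : Prop :=
  4 ≤ i ∧ j = 3 ∧ i.toNat < mat.length ∧
    3 < (mat.getD i.toNat []).length ∧ (mat.getD i.toNat []).getD 3 1 = 0
instance (mat : List (List Int)) (i : Int) (j : Int) : Decidable (D_revisar_matriz mat i j) := by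
  unfold D_revisar_matriz; infer_instance

def Spec_revisar_matriz (mat : List (List Int)) (i : Int) (j : Int) (out : Option Bool) : Prop := ¬ D_revisar_matriz mat i j → out = revisar_matriz_alt mat i j
instance (mat : List (List Int)) (i : Int) (j : Int) (out : Option Bool) : Decidable (Spec_revisar_matriz mat i j out) := by unfold Spec_revisar_matriz; infer_instance

def pvDiffWitness_revisar_matriz : List (List Int) × Int × Int :=
  ([[9, 9, 9, 9], [9, 9, 9, 9], [9, 9, 9, 9], [9, 9, 9, 9], [9, 9, 9, 0]], 4, 3)
def pvDiffWitnessOut_revisar_matriz : (Option Bool) × (Option Bool) := (some true, none)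

-- ===== CLAIM (what is proved, stated in full; the proofs are below) =====
def Claim_unchanged_revisar_matriz : Prop := ∀ (mat : List (List Int)) (i : Int) (j : Int), Dom_revisar_matriz mat i j → Pre_revisar_matriz mat i j → Spec_revisar_matriz mat i j (revisar_matriz mat i j)
def Claim_changed_revisar_matriz : Prop := Dom_revisar_matriz (pvDiffWitness_revisar_matriz.1) (pvDiffWitness_revisar_matriz.2.1) (pvDiffWitness_revisar_matriz.2.2) ∧ Pre_revisar_matriz (pvDiffWitness_revisar_matriz.1) (pvDiffWitness_revisar_matriz.2.1) (pvDiffWitness_revisar_matriz.2.2) ∧ D_revisar_matriz (pvDiffWitness_revisar_matriz.1) (pvDiffWitness_revisar_matriz.2.1) (pvDiffWitness_revisar_matriz.2.2) ∧ revisar_matriz (pvDiffWitness_revisar_matriz.1) (pvDiffWitness_revisar_matriz.2.1) (pvDiffWitness_revisar_matriz.2.2) = pvDiffWitnessOut_revisar_matriz.1 ∧ revisar_matriz_alt (pvDiffWitness_revisar_matriz.1) (pvDiffWitness_revisar_matriz.2.1) (pvDiffWitness_revisar_matriz.2.2) = pvDiffWitnessOut_revisar_matriz.2 ∧ pvDiffWitnessOut_revisar_matriz.1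 ≠ pvDiffWitnessOut_revisar_matriz.2
def Claim_exact_revisar_matriz : Prop := ∀ (mat : List (List Int)) (i : Int) (j : Int), Dom_revisar_matriz mat i j → Pre_revisar_matriz mat i j → D_revisar_matriz mat i j → revisar_matriz mat i j ≠ revisar_matriz_alt mat i j

-- ===== LEMMAS AND PROOFS =====

-- the D_ shape condition is exactly 'the python access mat[i][3] yields 0' (i ≥ 0)
theorem cell_eq_zero_iff (mat : List (List Int)) (i : Int) (hi : 0 ≤ i) :
    (PySem.List.pyGet? mat i >>= fun row => PySem.List.pyGet? row 3) = some 0 ↔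
      (i.toNat < mat.length ∧ 3 < (mat.getD i.toNat []).length ∧
        (mat.getD i.toNat []).getD 3 1 = 0) := by
  rw [PySem.List.pyGet?_of_nonneg mat hi]
  cases hrow : mat[i.toNat]? with
  | none =>
    have hlen : mat.length ≤ i.toNat := by
      simpa using List.getElem?_eq_none_iff.mp hrow
    refine ⟨fun h => absurd h (by simp), fun ⟨h, _⟩ => absurd hlen (by omega)⟩
  | some row =>
    have hlt : i.toNat < mat.length := (List.getElem?_eq_some_iff.mp hrow).1
    have hgetD : mat.getD i.toNat [] = row := by
      rw [List.getD_eq_getElem?_getD, hrow]; rfl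
    show PySem.List.pyGet? row 3 = some 0 ↔ _
    rw [show PySem.List.pyGet? row 3 = row[(3:Int).toNat]? from
      PySem.List.pyGet?_of_nonneg row (by decide), hgetD]
    cases hc : row[(3:Int).toNat]? with
    | none =>
      have : row.length ≤ 3 := by simpa using List.getElem?_eq_none_iff.mp hc
      constructor
      · intro h; exact absurd h (by simp)
      · intro ⟨_, h, _⟩; omega
    | some v =>
      have h3 : (3:Int).toNat < row.length := (List.getElem?_eq_some_iff.mp hc).1
      have hv : row[(3:Int).toNat] = v := (List.getElem?_eq_some_iff.mp hc).2
      have hrowD : row.getD 3 1 = v := by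
        rw [List.getD_eq_getElem?_getD]
        simp only [show ((3:Int).toNat) = 3 from rfl] at hc
        rw [hc]; rfl
      constructor
      · intro h; refine ⟨hlt, by omega, by simp_all⟩
      · intro ⟨_, _, h0⟩; simp_all

-- A returns none once the scan has left the board with j ≠ 3
theorem revisarA_none_of_out (mat : List (List Int)) (i : Int) (hi : 4 ≤ i) :
    ∀ fuel, revisarA mat i 0 fuel = none := by
  intro fuel
  cases fuel with
  | zero => rfl
  | succ fuel =>
    rw [revisarA]
    simp [show ¬ (0 : Int) = 3 by decide, show ¬ i < 4 by omega]

-- at equal fuel the ports agree on every start outside D_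
theorem revisarA_eq_B (fuel : Nat) : ∀ (mat : List (List Int)) (i j : Int),
    ¬ D_revisar_matriz mat i j → revisarA mat i j fuel = revisarB mat i j fuel := by
  induction fuel with
  | zero => intro mat i j _; rfl
  | succ fuel ih =>
    intro mat i j hD
    rw [revisarA, revisarB]
    by_cases hj : j = 3
    · subst hj
      by_cases hi : i < 4
      · simp only [if_pos (show i < 4 ∧ (3:Int) < 4 from ⟨hi, by decide⟩)]
        cases hm : PySem.List.pyGet? mat i >>= fun row => PySem.List.pyGet? row 3 with
        | none => rfl
        | some v =>
          by_cases hv : v = 0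
          · simp [hv]
          · simp only [if_neg hv]
            exact ih mat (i + 1) 0 (by unfold D_revisar_matriz; simp)
      · -- quirk start: A inspects the out-of-board cell, B exits at once
        simp only [if_neg (show ¬ (i < 4 ∧ (3:Int) < 4) by tauto)]
        cases hm : PySem.List.pyGet? mat i >>= fun row => PySem.List.pyGet? row 3 with
        | none => rfl
        | some v =>
          have hv : ¬ v = 0 := by
            intro h
            subst h
            exact hD ⟨by omega, rfl,
              ((cell_eq_zero_iff mat i (by omega)).mp hm)⟩
          simp only [if_neg hv]
          exact revisarA_none_of_out mat (i + 1) (by omega) fuel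
    · by_cases hlt : i < 4 ∧ j < 4
      · simp only [if_neg hj, if_neg (show ¬ (i = 3 ∧ j = 3) by tauto), if_pos hlt]
        cases hm : PySem.List.pyGet? mat i >>= fun row => PySem.List.pyGet? row j with
        | none => rfl
        | some v =>
          by_cases hv : v = 0
          · simp [hv]
          · simp only [if_neg hv]
            exact ih mat i (j + 1)
              (by unfold D_revisar_matriz; intro ⟨h4, _, _⟩; omega)
      · simp [hj, hlt]

-- ===== VERDICT (by name: the statements are the Claim_ definitions above) =====
theorem revisar_matriz_spec : Claim_unchanged_revisar_matriz := by
  intro mat i j _ _ hD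
  unfold revisar_matriz revisar_matriz_alt
  exact revisarA_eq_B 2000 mat i j hD

theorem revisar_matriz_changed : Claim_changed_revisar_matriz := by
  unfold Claim_changed_revisar_matriz; decide

theorem revisar_matriz_tight : Claim_exact_revisar_matriz := by
  intro mat i j _ _ hD
  obtain ⟨hi, hj, hc⟩ := hD
  subst hj
  unfold revisar_matriz revisar_matriz_alt
  rw [revisarA, revisarB]
  simp only [if_neg (show ¬ (i < 4 ∧ (3:Int) < 4) by omega)]
  rw [show (PySem.List.pyGet? mat i >>= fun row => PySem.List.pyGet? row 3) = some 0 from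
    (cell_eq_zero_iff mat i (by omega)).mpr hc]
  simp
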